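-- pv_equiv track=rewrite | github.com/majyc/atomic-tomorrow-adventures | code/atomic-tomorrow-creator/scripts/slice-portraits.py | find_peaks_simple
-- ===== SOURCE A (Python) =====
-- def find_peaks_simple(profile, min_gap, max_peaks):
--     """
--     Simple peak detection without scipy
--     """
--     peaks = []
--     for i in range(1, len(profile) - 1):
--         if profile[i] > profile[i-1] and profile[i] > profile[i+1]:
--             # Check minimum distance from existing peaks
--             if not peaks or min([abs(i - p) for p in peaks]) >= min_gap:
--                 peaks.append(i)
--                 if len(peaks) >= max_peaks:
--                     break
--     return peaks
-- ===== SOURCE B (Python) =====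
-- def find_peaks_simple(profile, min_gap, max_peaks):
--     # Two-pass decomposition: collect all local maxima first, then greedily
--     # select with the gap checked against the last accepted peak only
--     # (candidates are increasing, so the closest prior peak is the last one).
--     cands = [i for i in range(1, len(profile) - 1)
--              if profile[i] > profile[i - 1] and profile[i] > profile[i + 1]]
--     peaks = []
--     for c in cands:
--         if not peaks or c - peaks[-1] >= min_gap:
--             peaks.append(c)
--             if len(peaks) >= max_peaks:
--                 break
--     return peaks
-- ===== Notes on version B (the rewrite author's own statement) =====
-- stated objective: simpler
-- what changed: Two-pass decomposition: first collect all local-maximum indices, then greedily select them comparing only against the last accepted peak (O(1) per candidate) instead of A's fresh min over the list of all previously accepted peaks inside the scan.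
import Mathlib
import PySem

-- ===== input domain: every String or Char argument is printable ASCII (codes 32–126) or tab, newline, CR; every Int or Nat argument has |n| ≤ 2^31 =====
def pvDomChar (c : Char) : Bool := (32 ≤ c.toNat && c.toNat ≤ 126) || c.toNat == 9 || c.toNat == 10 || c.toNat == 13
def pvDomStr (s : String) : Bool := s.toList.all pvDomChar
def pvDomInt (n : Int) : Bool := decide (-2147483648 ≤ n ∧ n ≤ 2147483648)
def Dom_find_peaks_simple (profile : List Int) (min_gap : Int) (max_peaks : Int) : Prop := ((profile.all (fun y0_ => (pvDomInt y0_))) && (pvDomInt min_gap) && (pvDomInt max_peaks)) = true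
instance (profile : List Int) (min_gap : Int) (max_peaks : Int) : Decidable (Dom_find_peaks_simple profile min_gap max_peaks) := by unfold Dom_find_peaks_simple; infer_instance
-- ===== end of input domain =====

-- B replaces A's per-candidate min over all accepted peaks by a two-pass decomposition
-- (collect local maxima, then greedy selection against the last accepted peak only): simpler/cheaper per step.

-- ===== PORT A =====
-- A's loop over range(1, len(profile)-1) with accumulator `peaks` and an early break.
-- Indices i-1, i, i+1 are always in range 0..len-1, so pyGetD with default 0 is exact here.
def pvGoA (profile : List Int) (min_gap : Int) (max_peaks : Int) : List Int → List Int → List Int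
  | [], peaks => peaks
  | i :: rest, peaks =>
    if PySem.List.pyGetD profile i 0 > PySem.List.pyGetD profile (i-1) 0 ∧
       PySem.List.pyGetD profile i 0 > PySem.List.pyGetD profile (i+1) 0 then
      if peaks = [] ∨ (peaks.map (fun p => |i - p|)).min?.getD 0 ≥ min_gap then
        let peaks' := peaks ++ [i]
        if (peaks'.length : Int) ≥ max_peaks then peaks'
        else pvGoA profile min_gap max_peaks rest peaks'
      else pvGoA profile min_gap max_peaks rest peaks
    else pvGoA profile min_gap max_peaks rest peaks

def find_peaks_simple (profile : List Int) (min_gap : Int) (max_peaks : Int) : List Int :=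
  pvGoA profile min_gap max_peaks (PySem.List.pyRange 1 ((profile.length : Int) - 1) 1) []

-- ===== PORT B =====
-- the local-maximum test of B's comprehension filter
def pvIsPeak (profile : List Int) (i : Int) : Bool :=
  decide (PySem.List.pyGetD profile i 0 > PySem.List.pyGetD profile (i-1) 0 ∧
          PySem.List.pyGetD profile i 0 > PySem.List.pyGetD profile (i+1) 0)

-- B's greedy selection loop: `peaks[-1]` is the last element of the accumulator
def pvSelect (min_gap : Int) (max_peaks : Int) : List Int → List Int → List Int
  | [], peaks => peaks
  | c :: cs, peaks =>
    if (match peaks.getLast? with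
        | none => true
        | some p => decide (c - p ≥ min_gap)) then
      let peaks' := peaks ++ [c]
      if (peaks'.length : Int) ≥ max_peaks then peaks'
      else pvSelect min_gap max_peaks cs peaks'
    else pvSelect min_gap max_peaks cs peaks

def find_peaks_simple_alt (profile : List Int) (min_gap : Int) (max_peaks : Int) : List Int :=
  pvSelect min_gap max_peaks
    ((PySem.List.pyRange 1 ((profile.length : Int) - 1) 1).filter (pvIsPeak profile)) []

-- ===== PRECONDITION & SPEC =====
def Spec_find_peaks_simple (profile : List Int) (min_gap : Int) (max_peaks : Int) (out : List Int) : Prop := out = find_peaks_simple_alt profile min_gap max_peaks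
instance (profile : List Int) (min_gap : Int) (max_peaks : Int) (out : List Int) : Decidable (Spec_find_peaks_simple profile min_gap max_peaks out) := by unfold Spec_find_peaks_simple; infer_instance

-- ===== CLAIM (what is proved, stated in full; the proofs are below) =====
def Claim_equal_find_peaks_simple : Prop := ∀ (profile : List Int) (min_gap : Int) (max_peaks : Int), Dom_find_peaks_simple profile min_gap max_peaks → Spec_find_peaks_simple profile min_gap max_peaks (find_peaks_simple profile min_gap max_peaks)

-- ===== LEMMAS AND PROOFS =====

-- For a nonempty increasing `peaks` whose elements are all ≤ i,
-- min(|i - p| for p in peaks) is i - (last element).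
theorem pv_min_abs_eq_last (i : Int) (p : Int) (ps : List Int)
    (hs : (p :: ps).Pairwise (· ≤ ·)) (hle : ∀ q ∈ p :: ps, q ≤ i) :
    ((p :: ps).map (fun q => |i - q|)).min? = some (i - (p :: ps).getLast (by simp)) := by
  induction ps generalizing p with
  | nil =>
      simp only [List.map, List.min?_cons', List.foldl_nil, List.getLast]
      have : i - p ≥ 0 := by have := hle p (by simp); omega
      rw [abs_of_nonneg this]
  | cons q qs ih =>
      have hs' : (q :: qs).Pairwise (· ≤ ·) := hs.tail
      have hle' : ∀ r ∈ q :: qs, r ≤ i := fun r hr => hle r (List.mem_cons_of_mem _ hr)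
      have hrec := ih q hs' hle'
      have hpq : ∀ r ∈ q :: qs, p ≤ r := by
        intro r hr; exact (List.pairwise_cons.mp hs).1 r hr
      have hlast_mem : (q :: qs).getLast (by simp) ∈ q :: qs := List.getLast_mem _
      rw [List.map_cons, List.min?_cons, hrec]
      simp only [Option.elim]
      have hpi : p ≤ i := hle p (by simp)
      have hplast : p ≤ (q :: qs).getLast (by simp) := hpq _ hlast_mem
      have : min (|i - p|) (i - (q :: qs).getLast (by simp)) = i - (q :: qs).getLast (by simp) := by
        rw [abs_of_nonneg (by omega)]; omega
      rw [this]
      have : (p :: q :: qs).getLast (by simp) = (q :: qs).getLast (by simp) := by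
        simp [List.getLast]
      rw [this]

-- Core equivalence of the two loops under the scan invariants.
theorem pv_go_eq (profile : List Int) (mg mp : Int) (idxs : List Int) :
    ∀ peaks : List Int, peaks.Pairwise (· < ·) →
    (∀ p ∈ peaks, ∀ j ∈ idxs, p < j) → idxs.Pairwise (· < ·) →
    pvGoA profile mg mp idxs peaks = pvSelect mg mp (idxs.filter (pvIsPeak profile)) peaks := by
  induction idxs with
  | nil => intro peaks _ _ _; rfl
  | cons i rest ih =>
      intro peaks hsort hlt hidx
      have hidx' : rest.Pairwise (· < ·) := hidx.tail
      have hlt' : ∀ p ∈ peaks, ∀ j ∈ rest, p < j :=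
        fun p hp j hj => hlt p hp j (List.mem_cons_of_mem _ hj)
      by_cases hpk : (PySem.List.pyGetD profile i 0 > PySem.List.pyGetD profile (i-1) 0 ∧
                      PySem.List.pyGetD profile i 0 > PySem.List.pyGetD profile (i+1) 0)
      · -- i is a local maximum: it survives the filter
        have hfilter : (i :: rest).filter (pvIsPeak profile)
            = i :: rest.filter (pvIsPeak profile) := by
          simp [List.filter, pvIsPeak, hpk]
        rw [hfilter]
        -- the acceptance conditions of A and of B agree
        have hcond : (peaks = [] ∨ (peaks.map (fun p => |i - p|)).min?.getD 0 ≥ mg)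
            ↔ ((match peaks.getLast? with
                | none => true
                | some p => decide (i - p ≥ mg)) = true) := by
          cases peaks with
          | nil => simp
          | cons p ps =>
              have hle : ∀ q ∈ p :: ps, q ≤ i := by
                intro q hq; exact le_of_lt (hlt q hq i (by simp))
              have hmin := pv_min_abs_eq_last i p ps (hsort.imp le_of_lt) hle
              rw [List.getLast?_eq_some_getLast (l := p :: ps) (by simp), hmin]
              simp
        by_cases hacc : (peaks = [] ∨ (peaks.map (fun p => |i - p|)).min?.getD 0 ≥ mg)
        · -- accepted: both append i, then both break or both recurse
          have hsort' : (peaks ++ [i]).Pairwise (· < ·) := by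
            rw [List.pairwise_append]
            refine ⟨hsort, List.pairwise_singleton _ _, ?_⟩
            intro a ha b hb
            simp only [List.mem_singleton] at hb
            subst hb
            exact hlt a ha b (by simp)
          have hlt'' : ∀ p ∈ peaks ++ [i], ∀ j ∈ rest, p < j := by
            intro p hp j hj
            rcases List.mem_append.mp hp with h | h
            · exact hlt' p h j hj
            · simp at h; subst h; exact (List.pairwise_cons.mp hidx).1 j hj
          rw [pvGoA, pvSelect, if_pos hpk, if_pos hacc, if_pos (hcond.mp hacc)]
          by_cases hbrk : ((peaks ++ [i]).length : Int) ≥ mp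
          · simp only [if_pos hbrk]
          · simp only [if_neg hbrk]
            exact ih (peaks ++ [i]) hsort' hlt'' hidx'
        · -- rejected: both skip i
          rw [pvGoA, pvSelect, if_pos hpk, if_neg hacc,
              if_neg (by simpa using (not_iff_not.mpr hcond).mp hacc)]
          exact ih peaks hsort hlt' hidx'
      · -- not a local maximum: filtered out, A skips it
        have hfilter : (i :: rest).filter (pvIsPeak profile)
            = rest.filter (pvIsPeak profile) := by
          simp [List.filter, pvIsPeak, hpk]
        rw [hfilter, pvGoA, if_neg hpk]
        exact ih peaks hsort hlt' hidx'

-- ===== VERDICT (by name: the statement is the Claim_ definition above) =====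
theorem find_peaks_simple_spec : Claim_equal_find_peaks_simple := by
  intro profile min_gap max_peaks _
  unfold Spec_find_peaks_simple find_peaks_simple find_peaks_simple_alt
  exact pv_go_eq profile min_gap max_peaks _ [] (by simp) (by simp)
    (PySem.List.pairwise_lt_pyRange_one _ _)
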